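-- pv_equiv track=rewrite | github.com/LuisGustavoFreitas/TDE | Programação/Python/Exercicios/lista 5-5.py | modificarMatriz
-- ===== SOURCE A (Python) =====
-- def modificarMatriz(matriz):
--     elementos = [num for linha in matriz for num in linha]
--     pares = [num for num in elementos if num % 2 == 0]
--     impares = [num for num in elementos if num % 2 != 0]
--     novaLista = pares + impares
--
--     novaMatriz = []
--     for i in range(15):
--         linha = novaLista[i*7:(i+1)*7]
--         novaMatriz.append(linha)
--
--     return novaMatriz
-- ===== SOURCE B (Python) =====
-- def modificarMatriz(matriz):
--     elementos = [num for linha in matriz for num in linha]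
--     # stable sort by parity: evens (key 0) first in original order, then odds (key 1)
--     novaLista = sorted(elementos, key=lambda n: n % 2)
--     return [novaLista[i * 7:(i + 1) * 7] for i in range(15)]
-- ===== Notes on version B (the rewrite author's own statement) =====
-- stated objective: idiomatic
-- what changed: B replaces the two parity-filter passes and concatenation with a single stable sort keyed on n % 2, and builds the 15x7 grid with a list comprehension instead of an append loop.
import Mathlib
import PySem

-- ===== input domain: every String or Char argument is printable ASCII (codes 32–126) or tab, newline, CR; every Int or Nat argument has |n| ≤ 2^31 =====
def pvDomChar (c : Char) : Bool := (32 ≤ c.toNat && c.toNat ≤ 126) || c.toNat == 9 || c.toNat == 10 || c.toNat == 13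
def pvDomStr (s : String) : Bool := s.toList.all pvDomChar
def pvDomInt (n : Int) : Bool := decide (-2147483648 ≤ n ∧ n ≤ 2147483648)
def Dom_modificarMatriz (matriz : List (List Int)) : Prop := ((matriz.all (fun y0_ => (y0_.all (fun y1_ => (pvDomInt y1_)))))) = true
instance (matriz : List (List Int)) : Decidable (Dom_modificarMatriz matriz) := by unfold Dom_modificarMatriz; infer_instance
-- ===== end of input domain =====

-- B reorders the flattened elements with one stable sort keyed on parity instead of two filter passes,
-- and builds the 15x7 grid with a map instead of an append loop (idiomatic alternative, same results).


-- ===== PORT A =====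
def modificarMatriz (matriz : List (List Int)) : List (List Int) :=
  let elementos := matriz.flatMap (fun linha => linha)
  let pares := elementos.filter (fun num => decide (PySem.Int.mod num 2 = 0))
  let impares := elementos.filter (fun num => decide (PySem.Int.mod num 2 ≠ 0))
  let novaLista := pares ++ impares
  (PySem.List.pyRange 0 15 1).foldl
    (fun novaMatriz i =>
      novaMatriz ++ [PySem.List.slice novaLista (some (i * 7)) (some ((i + 1) * 7))]) []

-- ===== PORT B =====
def modificarMatriz_alt (matriz : List (List Int)) : List (List Int) :=
  let elementos := matriz.flatMap (fun linha => linha)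
  let novaLista := PySem.List.sorted elementos (fun n => PySem.Int.mod n 2)
  (PySem.List.pyRange 0 15 1).map
    (fun i => PySem.List.slice novaLista (some (i * 7)) (some ((i + 1) * 7)))

-- ===== PRECONDITION & SPEC =====
def Spec_modificarMatriz (matriz : List (List Int)) (out : List (List Int)) : Prop := out = modificarMatriz_alt matriz
instance (matriz : List (List Int)) (out : List (List Int)) : Decidable (Spec_modificarMatriz matriz out) := by unfold Spec_modificarMatriz; infer_instance

-- ===== CLAIM (what is proved, stated in full; the proofs are below) =====
def Claim_equal_modificarMatriz : Prop := ∀ (matriz : List (List Int)), Dom_modificarMatriz matriz → Spec_modificarMatriz matriz (modificarMatriz matriz)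

-- ===== LEMMAS AND PROOFS =====

-- parity of an Int under Python's % is 0 or 1
theorem pvMod2_cases (n : Int) : PySem.Int.mod n 2 = 0 ∨ PySem.Int.mod n 2 = 1 := by
  have h1 := PySem.Int.mod_nonneg n (b := 2) (by norm_num)
  have h2 := PySem.Int.mod_lt n (b := 2) (by norm_num)
  omega

-- inserting past a prefix none of whose elements the element goes before
theorem insertBy_append_of_not_before {α : Type} (before : α → α → Bool) (x : α)
    (e o : List α) (he : ∀ a ∈ e, before x a = false) :
    PySem.List.insertBy before x (e ++ o) = e ++ PySem.List.insertBy before x o := by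
  induction e with
  | nil => simp
  | cons a e ih =>
      have ha : before x a = false := he a (by simp)
      simp [PySem.List.insertBy, ha, ih (fun b hb => he b (by simp [hb]))]

-- the insertion-sort loop on the parity key keeps the accumulator as evens ++ odds
theorem pvFoldl_parity (xs e o : List Int)
    (he : ∀ a ∈ e, PySem.Int.mod a 2 = 0) (ho : ∀ a ∈ o, PySem.Int.mod a 2 ≠ 0) :
    xs.foldl (fun acc x =>
        PySem.List.insertBy (fun a b => decide (PySem.Int.mod a 2 < PySem.Int.mod b 2)) x acc)
      (e ++ o)
    = (e ++ xs.filter (fun num => decide (PySem.Int.mod num 2 = 0)))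
      ++ (o ++ xs.filter (fun num => decide (PySem.Int.mod num 2 ≠ 0))) := by
  induction xs generalizing e o with
  | nil => simp
  | cons x xs ih =>
      rcases pvMod2_cases x with hx | hx
      · -- even: goes right after e, before the first odd element of o
        have hstep : PySem.List.insertBy
            (fun a b => decide (PySem.Int.mod a 2 < PySem.Int.mod b 2)) x (e ++ o)
            = (e ++ [x]) ++ o := by
          rw [insertBy_append_of_not_before]
          · cases o with
            | nil => simp [PySem.List.insertBy]
            | cons b o' =>
                have hb : PySem.Int.mod b 2 = 1 := by
                  rcases pvMod2_cases b with h | h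
                  · exact absurd h (ho b (by simp))
                  · exact h
                have hlt : decide (PySem.Int.mod x 2 < PySem.Int.mod b 2) = true := by
                  rw [hx, hb]; decide
                simp only [PySem.List.insertBy, hlt, if_true]
                simp
          · intro a ha
            show decide (PySem.Int.mod x 2 < PySem.Int.mod a 2) = false
            rw [hx, he a ha]; decide
        rw [List.foldl_cons, hstep, ih (e ++ [x]) o
            (by intro a ha; rcases List.mem_append.mp ha with h | h
                · exact he a h
                · simp at h; rw [h]; exact hx) ho]
        have c1 : decide (PySem.Int.mod x 2 = 0) = true := by rw [hx]; decide
        have c2 : decide (PySem.Int.mod x 2 ≠ 0) = false := by rw [hx]; decide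
        simp only [List.filter_cons, c1, c2, if_true]
        simp
      · -- odd: goes to the very end
        have hstep : PySem.List.insertBy
            (fun a b => decide (PySem.Int.mod a 2 < PySem.Int.mod b 2)) x (e ++ o)
            = e ++ (o ++ [x]) := by
          rw [PySem.List.insertBy_of_forall_not_before, List.append_assoc]
          intro a _
          show decide (PySem.Int.mod x 2 < PySem.Int.mod a 2) = false
          have h2 := PySem.Int.mod_lt a (b := 2) (by norm_num)
          rw [hx]
          simp
          omega
        rw [List.foldl_cons, hstep, ih e (o ++ [x]) he
            (by intro a ha; rcases List.mem_append.mp ha with h | h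
                · exact ho a h
                · simp at h; rw [h, hx]; decide)]
        have c1 : decide (PySem.Int.mod x 2 = 0) = false := by rw [hx]; decide
        have c2 : decide (PySem.Int.mod x 2 ≠ 0) = true := by rw [hx]; decide
        simp only [List.filter_cons, c1, c2, if_true]
        simp

-- stable sort on the parity key is exactly evens ++ odds
theorem pvSorted_parity (xs : List Int) :
    PySem.List.sorted xs (fun n => PySem.Int.mod n 2)
    = xs.filter (fun num => decide (PySem.Int.mod num 2 = 0))
      ++ xs.filter (fun num => decide (PySem.Int.mod num 2 ≠ 0)) := by
  rw [PySem.List.sorted_eq_foldl_insertBy]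
  simpa using pvFoldl_parity xs [] [] (by simp) (by simp)

-- ===== VERDICT (by name: the statement is the Claim_ definition above) =====
theorem modificarMatriz_spec : Claim_equal_modificarMatriz := by
  intro matriz _
  unfold Spec_modificarMatriz modificarMatriz modificarMatriz_alt
  dsimp only
  rw [pvSorted_parity, PySem.List.foldl_append_singleton_eq_map]
  simp
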